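-- pv_equiv track=rewrite | github.com/baiyx-dev/sre-agent | backend/tools/service_tool.py | _merge_services
-- ===== SOURCE A (Python) =====
-- def _merge_services(local_services: list[dict], external_services: list[dict] | None):
--     if not external_services:
--         return local_services
--
--     merged = {}
--     for svc in local_services:
--         name = svc.get("name")
--         if name:
--             merged[name] = svc
--
--     for svc in external_services:
--         if isinstance(svc, dict) and svc.get("name"):
--             merged[svc["name"]] = svc
--
--     return [merged[name] for name in sorted(merged.keys())]
-- ===== SOURCE B (Python) =====
-- def _merge_services(local_services, external_services):
--     if not external_services:
--         return local_services
--
--     combined = [svc for svc in local_services if svc.get("name")]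
--     combined += [svc for svc in external_services
--                  if isinstance(svc, dict) and svc.get("name")]
--
--     seen = set()
--     result = []
--     for svc in reversed(combined):
--         name = svc["name"]
--         if name not in seen:
--             seen.add(name)
--             result.append(svc)
--
--     result.sort(key=lambda svc: svc["name"])
--     return result
-- ===== Notes on version B (the rewrite author's own statement) =====
-- stated objective: alternative
-- what changed: Replaces the name-keyed dict with a filter-and-append of both lists, a single reversed scan with a seen-set that keeps the last occurrence of each name, and a final sort of the now name-distinct list.
import Mathlib
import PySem

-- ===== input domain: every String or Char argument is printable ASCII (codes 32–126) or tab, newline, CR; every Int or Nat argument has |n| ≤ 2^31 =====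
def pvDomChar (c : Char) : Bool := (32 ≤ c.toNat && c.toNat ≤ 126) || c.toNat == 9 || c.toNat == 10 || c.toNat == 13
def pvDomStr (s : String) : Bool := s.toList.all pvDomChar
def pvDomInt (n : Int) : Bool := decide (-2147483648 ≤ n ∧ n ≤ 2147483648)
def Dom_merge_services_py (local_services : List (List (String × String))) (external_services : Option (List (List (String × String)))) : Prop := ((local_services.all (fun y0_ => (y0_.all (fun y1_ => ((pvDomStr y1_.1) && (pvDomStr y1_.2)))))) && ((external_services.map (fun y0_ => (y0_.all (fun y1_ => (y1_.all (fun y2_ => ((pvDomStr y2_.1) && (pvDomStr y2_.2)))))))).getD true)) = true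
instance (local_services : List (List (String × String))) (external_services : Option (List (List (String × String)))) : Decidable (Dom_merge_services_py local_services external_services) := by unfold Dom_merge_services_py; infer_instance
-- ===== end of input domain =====

-- B merges the two service lists without a dict: filter both lists, one reversed scan with a
-- seen-set keeping the last occurrence of each name, then sort the name-distinct result
-- (objective: alternative — same O(n log n) cost, different decomposition).

-- shared helpers: `svc.get("name")` and its Python truthiness (`None` and "" are falsy)
def pvNameOpt (svc : List (String × String)) : Option String := (PySem.Dict.mk svc).get? "name"
def pvTruthy (o : Option String) : Bool := o.getD "" != ""
def pvName (svc : List (String × String)) : String := (pvNameOpt svc).getD ""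

-- ===== PORT A =====
def merge_services_py (local_services : List (List (String × String))) (external_services : Option (List (List (String × String)))) : List (List (String × String)) :=
  match external_services with
  | none => local_services          -- `if not external_services` (None)
  | some ext =>
    if ext.isEmpty then local_services  -- `if not external_services` (empty list)
    else
      -- merged = {}; for svc in local_services: name = svc.get("name"); if name: merged[name] = svc
      let m1 : PySem.Dict String (List (String × String)) :=
        local_services.foldl (fun m svc =>
          let name := pvNameOpt svc
          if pvTruthy name then m.insert (name.getD "") svc else m) PySem.Dict.empty
      -- for svc in external_services: if isinstance(svc, dict) and svc.get("name"): merged[svc["name"]] = svc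
      -- (isinstance(svc, dict) is always true at this type; svc["name"] cannot raise under the guard)
      let m2 :=
        ext.foldl (fun m svc =>
          if pvTruthy (pvNameOpt svc) then m.insert ((pvNameOpt svc).getD "") svc else m) m1
      -- [merged[name] for name in sorted(merged.keys())]  (KeyError impossible: name ∈ keys)
      (PySem.List.sorted m2.keys (fun n => n) false).map (fun n => (m2.get? n).getD [])

-- ===== PORT B =====
def merge_services_py_alt (local_services : List (List (String × String))) (external_services : Option (List (List (String × String)))) : List (List (String × String)) :=
  match external_services with
  | none => local_services
  | some ext =>
    if ext.isEmpty then local_services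
    else
      -- combined = [svc for svc in local_services if svc.get("name")] + [… external …]
      let combined := local_services.filter (fun svc => pvTruthy (pvNameOpt svc))
                        ++ ext.filter (fun svc => pvTruthy (pvNameOpt svc))
      -- seen = set(); result = []; for svc in reversed(combined): … (keep last occurrence per name)
      let result := (combined.reverse.foldl
        (fun (acc : PySem.Set String × List (List (String × String))) svc =>
          if PySem.Set.contains acc.1 (pvName svc) then acc
          else (PySem.Set.add acc.1 (pvName svc), acc.2 ++ [svc]))
        (PySem.Set.empty, [])).2
      -- result.sort(key=lambda svc: svc["name"])
      PySem.List.sorted result (fun svc => pvName svc) false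

-- ===== PRECONDITION & SPEC =====
def Spec_merge_services_py (local_services : List (List (String × String))) (external_services : Option (List (List (String × String)))) (out : List (List (String × String))) : Prop := out = merge_services_py_alt local_services external_services
instance (local_services : List (List (String × String))) (external_services : Option (List (List (String × String)))) (out : List (List (String × String))) : Decidable (Spec_merge_services_py local_services external_services out) := by unfold Spec_merge_services_py; infer_instance

-- ===== CLAIM (what is proved, stated in full; the proofs are below) =====
def Claim_equal_merge_services_py : Prop := ∀ (local_services : List (List (String × String))) (external_services : Option (List (List (String × String)))), Dom_merge_services_py local_services external_services → Spec_merge_services_py local_services external_services (merge_services_py local_services external_services)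

-- ===== LEMMAS AND PROOFS =====

-- proof-side helpers: the reversed dedup scan as structural recursion, and "last occurrence of name n"
def pvGo : List (List (String × String)) → PySem.Set String → List (List (String × String))
  | [], _ => []
  | svc :: t, seen =>
    if PySem.Set.contains seen (pvName svc) then pvGo t seen
    else svc :: pvGo t (PySem.Set.add seen (pvName svc))

def pvLast (M : List (List (String × String))) (n : String) : List (String × String) :=
  (M.reverse.find? (fun svc => pvName svc == n)).getD []

theorem pvB1 (xs : List (List (String × String))) (seen : PySem.Set String)
    (res : List (List (String × String))) :
    (xs.foldl
      (fun (acc : PySem.Set String × List (List (String × String))) svc =>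
        if PySem.Set.contains acc.1 (pvName svc) then acc
        else (PySem.Set.add acc.1 (pvName svc), acc.2 ++ [svc])) (seen, res)).2
      = res ++ pvGo xs seen := by
  induction xs generalizing seen res with
  | nil => simp [pvGo]
  | cons s t ih =>
    simp only [List.foldl_cons]
    cases h : PySem.Set.contains seen (pvName s) with
    | true =>
      rw [if_pos rfl, ih seen res, pvGo, if_pos h]
    | false =>
      rw [if_neg (by simp), ih, pvGo,
        if_neg (by simpa [PySem.Set.contains] using h)]
      simp

theorem pvContains_add (seen : PySem.Set String) (a b : String) :
    PySem.Set.contains (PySem.Set.add seen a) b = (PySem.Set.contains seen b || b == a) := by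
  simp only [PySem.Set.add, PySem.Set.contains]
  split_ifs with h <;> by_cases hb : b = a <;> by_cases hs : b ∈ seen <;> simp_all

theorem pvB2 (xs : List (List (String × String))) (seen : PySem.Set String) :
    pvGo xs seen = (pvGo xs PySem.Set.empty).filter (fun s => !PySem.Set.contains seen (pvName s)) := by
  induction xs generalizing seen with
  | nil => simp [pvGo]
  | cons x t ih =>
    have hemp : PySem.Set.contains PySem.Set.empty (pvName x) = false := by
      simp [PySem.Set.contains, PySem.Set.empty]
    simp only [pvGo, hemp]
    cases hc : PySem.Set.contains seen (pvName x) with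
    | true =>
      have hc' : pvName x ∈ seen := by simpa [PySem.Set.contains] using hc
      rw [if_pos rfl, if_neg (by simp), List.filter_cons, if_neg (by simp [hc'])]
      rw [ih seen, ih (PySem.Set.add PySem.Set.empty (pvName x)), List.filter_filter]
      apply List.filter_congr
      intro s _
      rw [pvContains_add]
      cases hq : (pvName s == pvName x) with
      | true => simp [eq_of_beq hq, hc']
      | false => simp [PySem.Set.contains, PySem.Set.empty]
    | false =>
      have hc' : pvName x ∉ seen := by simpa [PySem.Set.contains] using hc
      rw [if_neg (by simp), if_neg (by simp), List.filter_cons, if_pos (by simp [hc'])]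
      congr 1
      rw [ih (PySem.Set.add seen (pvName x)), ih (PySem.Set.add PySem.Set.empty (pvName x)), List.filter_filter]
      apply List.filter_congr
      intro s _
      rw [pvContains_add, pvContains_add]
      simp [PySem.Set.contains, PySem.Set.empty, Bool.not_or, Bool.and_comm]

theorem pvMem_go (xs : List (List (String × String))) (seen : PySem.Set String)
    (s : List (String × String)) (h : s ∈ pvGo xs seen) : s ∈ xs := by
  induction xs generalizing seen with
  | nil => simp [pvGo] at h
  | cons x t ih =>
    simp only [pvGo] at h
    split_ifs at h with hc
    · exact List.mem_cons_of_mem _ (ih _ h)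
    · rcases List.mem_cons.mp h with h | h
      · exact h ▸ List.mem_cons_self
      · exact List.mem_cons_of_mem _ (ih _ h)

theorem pvName_pvLast (M : List (List (String × String))) (n : String)
    (h : n ∈ M.map pvName) : pvName (pvLast M n) = n := by
  rcases List.mem_map.mp h with ⟨s, hs, hn⟩
  have hrev : s ∈ M.reverse := List.mem_reverse.mpr hs
  have : ∃ x ∈ M.reverse, (fun svc => pvName svc == n) x = true := ⟨s, hrev, by simp [hn]⟩
  rcases List.find?_isSome.mpr this |> Option.isSome_iff_exists.mp with ⟨w, hw⟩
  have := List.find?_some hw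
  simp only [beq_iff_eq] at this
  simp [pvLast, hw, this]

theorem pvLast_append (M : List (List (String × String))) (s : List (String × String)) (m : String) :
    pvLast (M ++ [s]) m = if pvName s == m then s else pvLast M m := by
  simp only [pvLast, List.reverse_append, List.reverse_singleton, List.singleton_append,
    List.find?_cons]
  cases h : (pvName s == m) <;> simp

theorem pvOfList_append (l : List String) (n : String) :
    PySem.Set.ofList (l ++ [n]) = PySem.Set.add (PySem.Set.ofList l) n := by
  rw [PySem.Set.ofList_eq_foldl, PySem.Set.ofList_eq_foldl, List.foldl_append]
  rfl

theorem pvC2 (M : List (List (String × String))) :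
    (pvGo M.reverse PySem.Set.empty).Perm
      ((PySem.Set.ofList (M.map pvName)).map (pvLast M)) := by
  induction M using List.reverseRecOn with
  | nil => simp [pvGo]
  | append_singleton M s ih =>
    have hrev : (M ++ [s]).reverse = s :: M.reverse := by simp
    rw [hrev]
    simp only [pvGo]
    rw [if_neg (by simp [PySem.Set.contains, PySem.Set.empty])]
    rw [pvB2]
    have hfil : (pvGo M.reverse PySem.Set.empty).filter
        (fun t => !PySem.Set.contains (PySem.Set.add PySem.Set.empty (pvName s)) (pvName t))
        = (pvGo M.reverse PySem.Set.empty).filter (fun t => !(pvName t == pvName s)) := by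
      apply List.filter_congr
      intro t _
      rw [pvContains_add]
      simp [PySem.Set.contains, PySem.Set.empty]
    rw [hfil]
    simp only [List.map_append, List.map_cons, List.map_nil]
    rw [pvOfList_append]
    by_cases hmem : pvName s ∈ M.map pvName
    · -- name already present: add is a no-op; the entry for it is overwritten by s
      have hK : PySem.Set.add (PySem.Set.ofList (M.map pvName)) (pvName s)
          = PySem.Set.ofList (M.map pvName) := by
        simp only [PySem.Set.add, PySem.Set.contains]
        rw [if_pos (by simpa [PySem.Set.mem_ofList _ _] using hmem)]
      rw [hK]
      obtain ⟨l1, l2, hsplit⟩ := List.append_of_mem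
        (show pvName s ∈ PySem.Set.ofList (M.map pvName) from (PySem.Set.mem_ofList _ _).mpr hmem)
      have hnd : (PySem.Set.ofList (M.map pvName)).Nodup := PySem.Set.nodup_ofList _
      rw [hsplit] at hnd
      have hn12 : pvName s ∉ l1 ++ l2 := (List.nodup_cons.mp (List.nodup_middle.mp hnd)).1
      -- rewrite the mapped list: the entry at pvName s becomes s, others keep pvLast M
      have hmap1 : l1.map (pvLast (M ++ [s])) = l1.map (pvLast M) := by
        apply List.map_congr_left
        intro m hm
        rw [pvLast_append, if_neg]
        simp only [beq_iff_eq]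
        intro h; exact hn12 (List.mem_append_left _ (h ▸ hm))
      have hmap2 : l2.map (pvLast (M ++ [s])) = l2.map (pvLast M) := by
        apply List.map_congr_left
        intro m hm
        rw [pvLast_append, if_neg]
        simp only [beq_iff_eq]
        intro h; exact hn12 (List.mem_append_right _ (h ▸ hm))
      have hs' : pvLast (M ++ [s]) (pvName s) = s := by
        rw [pvLast_append, if_pos (by simp)]
      rw [hsplit, List.map_append, List.map_cons, hmap1, hmap2, hs']
      refine List.Perm.trans ?_ List.perm_middle.symm
      apply List.Perm.cons
      -- filter (≠ name s) of the go-list ~ map pvLast M over l1 ++ l2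
      have hperm := (ih.filter (fun t => !(pvName t == pvName s)))
      refine hperm.trans ?_
      rw [List.filter_map]
      have hKfil : (PySem.Set.ofList (M.map pvName)).filter
          ((fun t => !(pvName t == pvName s)) ∘ (pvLast M))
          = (PySem.Set.ofList (M.map pvName)).filter (fun m => !(m == pvName s)) := by
        apply List.filter_congr
        intro m hm
        simp only [Function.comp]
        rw [pvName_pvLast M m ((PySem.Set.mem_ofList _ _).mp hm)]
      rw [hKfil, hsplit, List.filter_append, List.filter_cons]
      rw [if_neg (by simp), List.filter_eq_self.mpr ?h1, List.filter_eq_self.mpr ?h2,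
        ← List.map_append]
      try exact List.Perm.refl _
      case h1 =>
        intro m hm; simp only [Bool.not_eq_eq_eq_not, Bool.not_true, beq_eq_false_iff_ne]
        intro h; exact hn12 (List.mem_append_left _ (h ▸ hm))
      case h2 =>
        intro m hm; simp only [Bool.not_eq_eq_eq_not, Bool.not_true, beq_eq_false_iff_ne]
        intro h; exact hn12 (List.mem_append_right _ (h ▸ hm))
    · -- fresh name: add appends it; no element of the go-list is filtered out
      have hK : PySem.Set.add (PySem.Set.ofList (M.map pvName)) (pvName s)
          = PySem.Set.ofList (M.map pvName) ++ [pvName s] := by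
        simp only [PySem.Set.add, PySem.Set.contains]
        rw [if_neg (by simpa [PySem.Set.mem_ofList _ _] using hmem)]
      rw [hK, List.map_append, List.map_cons, List.map_nil]
      have hs' : pvLast (M ++ [s]) (pvName s) = s := by
        rw [pvLast_append, if_pos (by simp)]
      rw [hs']
      have hmapK : (PySem.Set.ofList (M.map pvName)).map (pvLast (M ++ [s]))
          = (PySem.Set.ofList (M.map pvName)).map (pvLast M) := by
        apply List.map_congr_left
        intro m hm
        rw [pvLast_append, if_neg]
        simp only [beq_iff_eq]
        intro h
        exact hmem (h ▸ (PySem.Set.mem_ofList _ _).mp hm)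
      rw [hmapK]
      have hfix : (pvGo M.reverse PySem.Set.empty).filter (fun t => !(pvName t == pvName s))
          = pvGo M.reverse PySem.Set.empty := by
        apply List.filter_eq_self.mpr
        intro t ht
        simp only [Bool.not_eq_eq_eq_not, Bool.not_true, beq_eq_false_iff_ne]
        intro h
        exact hmem (h ▸ List.mem_map_of_mem (List.mem_reverse.mp (pvMem_go _ _ _ ht)))
      rw [hfix]
      exact (ih.cons s).trans (List.perm_append_singleton _ _).symm

theorem pvA2 (l : List (List (String × String))) (d : PySem.Dict String (List (String × String))) (n : String) :
    (l.foldl (fun m svc => m.insert (pvName svc) svc) d).get? n =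
      match l.reverse.find? (fun svc => pvName svc == n) with
      | some s => some s
      | none => d.get? n := by
  induction l generalizing d with
  | nil => simp
  | cons s t ih =>
    simp only [List.foldl_cons, List.reverse_cons, List.find?_append, ih]
    cases h : t.reverse.find? (fun svc => pvName svc == n) with
    | some w => simp
    | none =>
      simp only [List.find?_cons, List.find?_nil]
      cases hn : (pvName s == n) with
      | true =>
        simp only [Option.none_or]
        rw [eq_of_beq hn, PySem.Dict.get?_insert_self]
      | false =>
        simp only [Option.none_or]
        rw [PySem.Dict.get?_insert_of_ne]
        exact Ne.symm (ne_of_beq_false hn)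

theorem pvPairwise_map_lt (S : List String) (f : String → List (String × String))
    (hp : S.Pairwise (· < ·)) (hg : ∀ m ∈ S, pvName (f m) = m) :
    (S.map f).Pairwise (fun a b => pvName a < pvName b) := by
  rw [List.pairwise_map]
  refine List.Pairwise.imp_of_mem ?_ hp
  intro a b ha hb h
  rw [hg a ha, hg b hb]; exact h

theorem merge_services_py_spec : Claim_equal_merge_services_py := by
  intro ls es _
  unfold Spec_merge_services_py
  cases es with
  | none => rfl
  | some ext =>
    simp only [merge_services_py, merge_services_py_alt]
    cases hE : ext.isEmpty with
    | true => rw [if_pos rfl, if_pos rfl]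
    | false =>
      rw [if_neg (by simp), if_neg (by simp)]
      -- the shared filtered list and its name list
      set L := ls.filter (fun svc => pvTruthy (pvNameOpt svc))
            ++ ext.filter (fun svc => pvTruthy (pvNameOpt svc)) with hL
      -- A's dict is one insert-fold over L
      have hfoldA : ∀ (l : List (List (String × String)))
          (d : PySem.Dict String (List (String × String))),
          l.foldl (fun m svc =>
            let name := pvNameOpt svc
            if pvTruthy name then m.insert (name.getD "") svc else m) d
            = (l.filter (fun svc => pvTruthy (pvNameOpt svc))).foldl
                (fun m svc => m.insert (pvName svc) svc) d := by
        intro l d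
        exact PySem.List.foldl_if_eq_foldl_filter (fun svc => pvTruthy (pvNameOpt svc))
          (fun m svc => m.insert (pvName svc) svc) l d
      rw [hfoldA, hfoldA, ← List.foldl_append]
      -- A's lookups are last occurrences in L
      have hget : ∀ n, ((L.foldl (fun m svc => m.insert (pvName svc) svc)
          PySem.Dict.empty).get? n).getD [] = pvLast L n := by
        intro n
        rw [pvA2]
        cases h : L.reverse.find? (fun svc => pvName svc == n) with
        | some w => simp [pvLast, h]
        | none => simp [pvLast, h, PySem.Dict.get?_empty]
      -- A's keys are the distinct names of L in first-occurrence order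
      have hkeys : (L.foldl (fun m svc => m.insert (pvName svc) svc)
          PySem.Dict.empty).keys = PySem.Set.ofList (L.map pvName) := by
        rw [PySem.Dict.keys_foldl_insert_key L pvName
          (fun _ svc => svc) PySem.Dict.empty]
        rfl
      rw [hkeys]
      rw [List.map_congr_left (fun n _ => hget n)]
      -- B's scan list is pvGo over the reversed L
      have hB : ((L.reverse.foldl
          (fun (acc : PySem.Set String × List (List (String × String))) svc =>
            if PySem.Set.contains acc.1 (pvName svc) then acc
            else (PySem.Set.add acc.1 (pvName svc), acc.2 ++ [svc]))
          (PySem.Set.empty, [])).2) = pvGo L.reverse PySem.Set.empty := by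
        rw [pvB1]; rfl
      rw [hB]
      -- B's sort of the name-distinct scan list is A's sorted-keys rendering
      have hperm : ((PySem.List.sorted (PySem.Set.ofList (L.map pvName))
          (fun n => n) false).map (pvLast L)).Perm (pvGo L.reverse PySem.Set.empty) :=
        (((PySem.List.sorted_perm (PySem.Set.ofList (L.map pvName))
          (fun n => n) false).map (pvLast L)).trans (pvC2 L).symm)
      have hpair : ((PySem.List.sorted (PySem.Set.ofList (L.map pvName))
          (fun n => n) false).map (pvLast L)).Pairwise (fun a b => pvName a < pvName b) := by
        refine pvPairwise_map_lt _ _ ?_ ?_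
        · exact PySem.List.sorted_ofList_pairwise_lt (L.map pvName)
        · intro m hm
          refine pvName_pvLast L m ?_
          have := (PySem.List.mem_sorted _ _ _ _).mp hm
          exact (PySem.Set.mem_ofList _ _).mp this
      exact (PySem.List.sorted_eq_of_perm_of_pairwise_lt _ _ _ hperm hpair).symm
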